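-- pv_equiv track=rewrite | github.com/minhquang1008/projects | OpenCV/PDF_Reader_reconstruct/tools.py | grouper
-- ===== SOURCE A (Python) =====
-- def grouper(iterable: list, length):
--     prev = None
--     group = []
--     for item in iterable:
--         if prev is None or item - prev <= 30:
--             group.append(item)
--         else:
--             if len(group) > length:
--                 yield group
--             group = [item]
--         prev = item
--     if len(group) > length:
--         yield group
-- ===== SOURCE B (Python) =====
-- def grouper(iterable: list, length):
--     # Compute cut indices where the gap rule breaks, then slice out the segments.
--     items = list(iterable)
--     n = len(items)
--     bounds = [0] + [i for i in range(1, n) if items[i] - items[i - 1] > 30] + [n]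
--     for a, b in zip(bounds, bounds[1:]):
--         if b - a > length:
--             yield items[a:b]
-- ===== Notes on version B (the rewrite author's own statement) =====
-- stated objective: alternative
-- what changed: B replaces A's stateful accumulation (prev/group/yield) by an index computation: it finds all cut positions i with items[i]-items[i-1] > 30 in one comprehension, forms the boundary list [0]+cuts+[n], and yields the slice items[a:b] for each consecutive boundary pair with b-a > length.
import Mathlib
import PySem

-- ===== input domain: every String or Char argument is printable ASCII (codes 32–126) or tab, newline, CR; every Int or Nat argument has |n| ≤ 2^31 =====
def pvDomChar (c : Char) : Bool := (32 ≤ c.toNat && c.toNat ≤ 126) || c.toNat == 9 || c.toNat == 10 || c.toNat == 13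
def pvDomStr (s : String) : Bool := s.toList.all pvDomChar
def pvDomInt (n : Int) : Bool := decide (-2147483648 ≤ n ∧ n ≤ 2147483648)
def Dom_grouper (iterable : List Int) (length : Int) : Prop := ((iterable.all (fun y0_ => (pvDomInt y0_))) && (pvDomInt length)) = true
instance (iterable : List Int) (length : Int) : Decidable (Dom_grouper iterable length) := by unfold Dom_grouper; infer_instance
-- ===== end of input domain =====

-- B replaces A's stateful prev/group accumulation by computing the list of cut indices
-- (the positions where the gap exceeds 30) and slicing the list between consecutive
-- boundaries (objective: alternative algorithm, same cost).

-- ===== PORT A =====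
-- state: (prev, group, out); A yields (appends to out) a completed group only when it is long enough
def grouperStepA (length : Int) (st : Option Int × List Int × List (List Int)) (item : Int) :
    Option Int × List Int × List (List Int) :=
  match st with
  | (prev, group, out) =>
    match prev with
    | none => (some item, group ++ [item], out)
    | some p =>
      if item - p ≤ 30 then (some item, group ++ [item], out)
      else (some item, [item], if (group.length : Int) > length then out ++ [group] else out)

def grouper (iterable : List Int) (length : Int) : List (List Int) :=
  let s := iterable.foldl (grouperStepA length) (none, [], [])
  if (s.2.1.length : Int) > length then s.2.2 ++ [s.2.1] else s.2.2

-- ===== PORT B =====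
-- bounds = [0] + [i for i in range(1, n) if items[i] - items[i-1] > 30] + [n];
-- then yield items[a:b] for consecutive (a, b) with b - a > length (yield loop = foldl append)
def grouper_alt (iterable : List Int) (length : Int) : List (List Int) :=
  let items := iterable
  let n : Int := (items.length : Int)
  let bounds : List Int :=
    [0] ++ (PySem.List.pyRange 1 n 1).filter
      (fun i => PySem.List.pyGetD items i 0 - PySem.List.pyGetD items (i - 1) 0 > 30) ++ [n]
  (bounds.zip bounds.tail).foldl
    (fun out ab =>
      if ab.2 - ab.1 > length then out ++ [PySem.List.slice items (some ab.1) (some ab.2)] else out)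
    []

-- ===== PRECONDITION & SPEC =====
def Spec_grouper (iterable : List Int) (length : Int) (out : List (List Int)) : Prop := out = grouper_alt iterable length
instance (iterable : List Int) (length : Int) (out : List (List Int)) : Decidable (Spec_grouper iterable length out) := by unfold Spec_grouper; infer_instance

-- ===== CLAIM (what is proved, stated in full; the proofs are below) =====
def Claim_equal_grouper : Prop := ∀ (iterable : List Int) (length : Int), Dom_grouper iterable length → Spec_grouper iterable length (grouper iterable length)

-- ===== LEMMAS AND PROOFS =====

-- "the group is long enough"
def pvBig (length : Int) (g : List Int) : Bool := decide ((g.length : Int) > length)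

-- first maximal run continuing from prev p, and the remainder
def runSplit : List Int → Int → List Int × List Int
  | [], _ => ([], [])
  | x :: xs, p =>
    if x - p ≤ 30 then ((x :: (runSplit xs x).1), (runSplit xs x).2) else ([], x :: xs)

theorem runSplit_decomp (t : List Int) (x : Int) : t = (runSplit t x).1 ++ (runSplit t x).2 := by
  induction t generalizing x with
  | nil => rfl
  | cons y ys ih =>
    simp only [runSplit]
    split_ifs with h
    · simpa using ih y
    · rfl

theorem runSplit_rest_le (t : List Int) (x : Int) : (runSplit t x).2.length ≤ t.length := by
  conv_rhs => rw [runSplit_decomp t x]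
  simp

-- the groups of a nonempty list, as maximal runs
def segs : List Int → List (List Int)
  | [] => []
  | x :: t => (x :: (runSplit t x).1) :: segs (runSplit t x).2
termination_by l => l.length
decreasing_by
  exact Nat.lt_succ_of_le (runSplit_rest_le t x)

-- adjacent elements of a run differ by at most 30
theorem runSplit_chain (t : List Int) (x : Int) :
    (x :: (runSplit t x).1).IsChain (fun a b => b - a ≤ 30) := by
  induction t generalizing x with
  | nil => simp [runSplit]
  | cons y ys ih =>
    simp only [runSplit]
    split_ifs with h
    · exact List.isChain_cons_cons.mpr ⟨h, ih y⟩
    · simp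

-- the remainder starts with a gap greater than 30
theorem runSplit_boundary (t : List Int) (x : Int) (h : (runSplit t x).2 ≠ []) :
    (runSplit t x).2.getD 0 0 - (x :: (runSplit t x).1).getLast (by simp) > 30 := by
  induction t generalizing x with
  | nil => simp [runSplit] at h
  | cons y ys ih =>
    by_cases hle : y - x ≤ 30
    · have h' : (runSplit ys y).2 ≠ [] := by
        simpa [runSplit, hle] using h
      have := ih y h'
      simpa [runSplit, hle, List.getLast_cons] using this
    · simp [runSplit, hle] at h ⊢
      omega

-- A's loop, related to the run decomposition
theorem keyA (length : Int) (l : List Int) :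
    ∀ (p : Int) (group : List Int) (gs : List (List Int)),
    (let s := l.foldl (grouperStepA length) (some p, group, gs.filter (pvBig length));
     if (s.2.1.length : Int) > length then s.2.2 ++ [s.2.1] else s.2.2)
    = (gs ++ ((group ++ (runSplit l p).1) :: segs (runSplit l p).2)).filter (pvBig length) := by
  induction l with
  | nil =>
    intro p group gs
    by_cases h : (group.length : Int) > length <;>
      simp [runSplit, segs, List.filter_append, List.filter, pvBig, h]
  | cons x t ih =>
    intro p group gs
    by_cases hgap : x - p ≤ 30
    · simp only [List.foldl_cons, grouperStepA, hgap, if_pos, runSplit]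
      have := ih x (group ++ [x]) gs
      simp only [hgap] at *
      simpa [List.append_assoc] using this
    · simp only [List.foldl_cons, grouperStepA, hgap, if_neg, not_false_iff, runSplit]
      have h1 : (if (group.length : Int) > length
            then gs.filter (pvBig length) ++ [group]
            else gs.filter (pvBig length))
          = (gs ++ [group]).filter (pvBig length) := by
        by_cases h : (group.length : Int) > length <;>
          simp [List.filter_append, List.filter, pvBig, h]
      rw [h1]
      have := ih x [x] (gs ++ [group])
      rw [this]
      rw [show segs (x :: t) = (x :: (runSplit t x).1) :: segs (runSplit t x).2 from by
        simp [segs]]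
      simp

-- A computes exactly the long groups
theorem grouper_eq_segs (l : List Int) (length : Int) :
    grouper l length = (if l = [] then [[]] else segs l).filter (pvBig length) := by
  cases l with
  | nil =>
    by_cases h : (0 : Int) > length <;> simp [grouper, pvBig, h]
  | cons x t =>
    have h := keyA length t x [x] []
    simp only [List.filter_nil, List.nil_append] at h
    rw [show segs (x :: t) = (x :: (runSplit t x).1) :: segs (runSplit t x).2 from by
      simp [segs]]
    simpa [grouper, grouperStepA] using h

-- cut positions of a list (group-start indices, as naturals)
def pvCutsN (items : List Int) : List Nat :=
  ((List.range (items.length - 1)).filter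
      (fun j => decide (items.getD (j + 1) 0 - items.getD j 0 > 30))).map (· + 1)

-- slices between consecutive boundaries that are long enough
def pvPairsOut (items : List Int) (length : Int) (bs : List Nat) : List (List Int) :=
  ((bs.zip bs.tail).filter (fun ab => decide (((ab.2 : Int)) - ((ab.1 : Int)) > length))).map
    (fun ab => (items.drop ab.1).take (ab.2 - ab.1))

theorem grouper_alt_eq_pairs (items : List Int) (length : Int) :
    grouper_alt items length
      = pvPairsOut items length (0 :: (pvCutsN items ++ [items.length])) := by
  have hto : ((items.length : Int) - 1).toNat = items.length - 1 := by omega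
  have hcuts :
      (PySem.List.pyRange 1 (items.length : Int) 1).filter
          (fun i => decide (PySem.List.pyGetD items i 0 - PySem.List.pyGetD items (i - 1) 0 > 30))
        = List.map (Nat.cast : Nat → Int) (pvCutsN items) := by
    rw [PySem.List.pyRange_one, hto, List.filter_map]
    rw [List.filter_congr (q := fun j => decide (items.getD (j + 1) 0 - items.getD j 0 > 30))]
    · unfold pvCutsN
      rw [List.map_map]
      apply List.map_congr_left
      intro k _
      simp
      omega
    · intro k _
      have h1 : (1 : Int) + (k : Int) = ((k + 1 : Nat) : Int) := by push_cast; ring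
      have h3 : ((k + 1 : Nat) : Int) - 1 = ((k : Nat) : Int) := by push_cast; ring
      simp only [Function.comp, h1, h3, PySem.List.pyGetD_natCast]
  have foldX : ∀ (L : List (Nat × Nat)) (acc : List (List Int)),
      L.foldl (fun out ab =>
          if ((ab.2 : Int)) - ((ab.1 : Int)) > length
          then out ++ [PySem.List.slice items (some (ab.1 : Int)) (some (ab.2 : Int))] else out) acc
        = acc ++ (L.filter (fun ab => decide (((ab.2 : Int)) - ((ab.1 : Int)) > length))).map
            (fun ab => (items.drop ab.1).take (ab.2 - ab.1)) := by
    intro L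
    induction L with
    | nil => intro acc; simp
    | cons ab L ih =>
      intro acc
      simp only [List.foldl_cons]
      split_ifs with h
      · rw [ih]; simp [h, PySem.List.slice_natCast]
      · rw [ih]; simp [h]
  simp only [grouper_alt]
  rw [hcuts]
  have hb : [(0 : Int)] ++ List.map (Nat.cast : Nat → Int) (pvCutsN items) ++ [(items.length : Int)]
      = List.map (Nat.cast : Nat → Int) (0 :: (pvCutsN items ++ [items.length])) := by
    simp
  rw [hb, show (List.map (Nat.cast : Nat → Int) (0 :: (pvCutsN items ++ [items.length]))).tail
      = List.map (Nat.cast : Nat → Int) (0 :: (pvCutsN items ++ [items.length])).tail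
      from List.map_tail.symm]
  rw [List.zip_map, List.foldl_map]
  simp only [Prod.map_fst, Prod.map_snd]
  rw [foldX]
  simp [pvPairsOut]

theorem pvPairsOut_cons (items : List Int) (length : Int) (a b : Nat) (bs : List Nat) :
    pvPairsOut items length (a :: b :: bs)
      = (if ((b : Int)) - ((a : Int)) > length then [(items.drop a).take (b - a)] else [])
        ++ pvPairsOut items length (b :: bs) := by
  by_cases h : ((b : Int)) - ((a : Int)) > length <;>
    simp [pvPairsOut, List.zip, h]

-- the cuts beyond pre are: the end of the first run of l, then the cuts beyond it
theorem cutFilt (full pre : List Int) (l : List Int) (x : Int) (t : List Int)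
    (hl : l = x :: t) (hfull : full = pre ++ l) :
    (pvCutsN full).filter (fun c => decide (pre.length < c))
      = (if (runSplit t x).2 = [] then []
         else (pre.length + ((runSplit t x).1.length + 1))
            :: (pvCutsN full).filter
                 (fun c => decide (pre.length + ((runSplit t x).1.length + 1) < c))) := by
  subst hl hfull
  set r := (runSplit t x).1 with hr
  set rest := (runSplit t x).2 with hrest
  set k := r.length + 1 with hk
  set off := pre.length with hoff
  have hdec : t = r ++ rest := by rw [hr, hrest]; exact runSplit_decomp t x
  have hg1 : ∀ i, i < k → (pre ++ (x :: t)).getD (off + i) 0 = (x :: r).getD i 0 := by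
    intro i hi
    rw [List.getD_append_right _ _ _ _ (by omega)]
    have h1 : off + i - pre.length = i := by omega
    rw [h1, hdec, show x :: (r ++ rest) = (x :: r) ++ rest from rfl,
      List.getD_append _ _ _ _ (by simp; omega)]
  have hg2 : (pre ++ (x :: t)).getD (off + k) 0 = rest.getD 0 0 := by
    rw [List.getD_append_right _ _ _ _ (by omega)]
    have h1 : off + k - pre.length = k := by omega
    rw [h1, hdec, show x :: (r ++ rest) = (x :: r) ++ rest from rfl,
      List.getD_append_right _ _ _ _ (by simp [hk])]
    simp [hk]
  have hch : ∀ i, i + 1 < k → (x :: r).getD (i + 1) 0 - (x :: r).getD i 0 ≤ 30 := by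
    have hc := runSplit_chain t x
    rw [List.isChain_iff_getElem] at hc
    intro i hi
    have h1 : i + 1 < (x :: r).length := by simp; omega
    rw [List.getD_eq_getElem _ _ h1, List.getD_eq_getElem _ _ (by simp at h1 ⊢; omega)]
    exact hc i h1
  have hbd : rest ≠ [] → rest.getD 0 0 - (x :: r).getD (k - 1) 0 > 30 := by
    intro h
    have hb := runSplit_boundary t x (by rw [← hrest]; exact h)
    have hlast : (x :: (runSplit t x).1).getLast (by simp) = (x :: r).getD (k - 1) 0 := by
      rw [List.getLast_eq_getElem, List.getD_eq_getElem _ _ (by simp [hk])]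
      simp [← hr, hk]
    rw [hlast] at hb
    exact hb
  have F1 : ∀ j, off ≤ j → j + 1 < off + k →
      (decide ((pre ++ (x :: t)).getD (j + 1) 0 - (pre ++ (x :: t)).getD j 0 > 30)) = false := by
    intro j h1 h2
    obtain ⟨i, rfl⟩ : ∃ i, j = off + i := ⟨j - off, by omega⟩
    rw [show off + i + 1 = off + (i + 1) from by omega, hg1 _ (by omega), hg1 _ (by omega)]
    simp only [decide_eq_false_iff_not, not_lt, gt_iff_lt]
    have := hch i (by omega)
    omega
  have F2 : rest ≠ [] →
      (decide ((pre ++ (x :: t)).getD (off + k - 1 + 1) 0 - (pre ++ (x :: t)).getD (off + k - 1) 0 > 30)) = true := by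
    intro h
    have e1 : off + k - 1 + 1 = off + k := by omega
    have e2 : off + k - 1 = off + (k - 1) := by omega
    rw [e1, hg2, e2, hg1 _ (by omega)]
    simp only [decide_eq_true_eq, gt_iff_lt]
    have := hbd h
    omega
  have hN : (pre ++ (x :: t)).length = off + k + rest.length := by
    simp [hdec, hk, hoff]
    omega
  have hfilt : ∀ m : Nat, (pvCutsN (pre ++ (x :: t))).filter (fun c => decide (m < c))
      = ((List.range ((pre ++ (x :: t)).length - 1)).filter
          (fun j => decide (m ≤ j) &&
            decide ((pre ++ (x :: t)).getD (j + 1) 0 - (pre ++ (x :: t)).getD j 0 > 30))).map (· + 1) := by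
    intro m
    unfold pvCutsN
    rw [List.filter_map, List.filter_filter]
    congr 1
    apply List.filter_congr
    intro j _
    simp only [Function.comp]
    congr 1
    simp only [decide_eq_decide]
    omega
  by_cases hre : rest = []
  · rw [if_pos hre, hfilt off]
    have : (List.range ((pre ++ (x :: t)).length - 1)).filter
        (fun j => decide (off ≤ j) &&
          decide ((pre ++ (x :: t)).getD (j + 1) 0 - (pre ++ (x :: t)).getD j 0 > 30)) = [] := by
      rw [List.filter_eq_nil_iff]
      intro j hj
      rw [List.mem_range, hN, hre] at hj
      simp only [List.length_nil, Nat.add_zero] at hj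
      by_cases hoj : off ≤ j
      · rw [F1 j hoj (by omega)]; simp
      · simp [hoj]
    rw [this]
    rfl
  · rw [if_neg hre]
    rw [hfilt off, hfilt (off + k)]
    have hrl : 1 ≤ rest.length := by
      have := List.length_pos_iff.mpr hre
      omega
    have hsplit : List.range ((pre ++ (x :: t)).length - 1)
        = List.range (off + k) ++ (List.range (rest.length - 1)).map (fun i => (off + k) + i) := by
      rw [hN, show off + k + rest.length - 1 = (off + k) + (rest.length - 1) from by omega,
        List.range_add]
    rw [hsplit, List.filter_append, List.filter_append, List.map_append, List.map_append]
    have hzero : (List.range (off + k - 1)).filter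
        (fun j => decide (off ≤ j) &&
          decide ((pre ++ (x :: t)).getD (j + 1) 0 - (pre ++ (x :: t)).getD j 0 > 30)) = [] := by
      rw [List.filter_eq_nil_iff]
      intro j hj
      rw [List.mem_range] at hj
      by_cases hoj : off ≤ j
      · rw [F1 j hoj (by omega)]; simp
      · simp [hoj]
    have hA : (List.range (off + k)).filter
        (fun j => decide (off ≤ j) &&
          decide ((pre ++ (x :: t)).getD (j + 1) 0 - (pre ++ (x :: t)).getD j 0 > 30)) = [off + k - 1] := by
      obtain ⟨m, hm⟩ : ∃ m, off + k = m + 1 := ⟨off + k - 1, by omega⟩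
      have hm' : off + k - 1 = m := by omega
      rw [hm, List.range_succ, List.filter_append, show m = off + k - 1 from hm'.symm, hzero]
      simp only [List.nil_append, List.filter_cons]
      rw [F2 hre]
      simp [hm']
      omega
    have hB : (List.range (off + k)).filter
        (fun j => decide (off + k ≤ j) &&
          decide ((pre ++ (x :: t)).getD (j + 1) 0 - (pre ++ (x :: t)).getD j 0 > 30)) = [] := by
      rw [List.filter_eq_nil_iff]
      intro j hj
      rw [List.mem_range] at hj
      simp [show ¬ (off + k ≤ j) from by omega]
    have hC : ((List.range (rest.length - 1)).map (fun i => (off + k) + i)).filter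
        (fun j => decide (off ≤ j) &&
          decide ((pre ++ (x :: t)).getD (j + 1) 0 - (pre ++ (x :: t)).getD j 0 > 30))
        = ((List.range (rest.length - 1)).map (fun i => (off + k) + i)).filter
        (fun j => decide (off + k ≤ j) &&
          decide ((pre ++ (x :: t)).getD (j + 1) 0 - (pre ++ (x :: t)).getD j 0 > 30)) := by
      apply List.filter_congr
      intro j hj
      simp only [List.mem_map] at hj
      obtain ⟨i, _, hi⟩ := hj
      congr 1
      simp only [decide_eq_decide]
      omega
    rw [hA, hB, hC]
    simp only [List.map_cons, List.map_nil, List.cons_append, List.nil_append]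
    congr 1

-- B's boundary pairs compute exactly the long groups
theorem mainB (full : List Int) (length : Int) :
    ∀ (n : Nat) (l pre : List Int), l.length ≤ n → l ≠ [] → full = pre ++ l →
    pvPairsOut full length
        (pre.length :: ((pvCutsN full).filter (fun c => decide (pre.length < c)) ++ [full.length]))
      = (segs l).filter (pvBig length) := by
  intro n
  induction n with
  | zero =>
    intro l pre h1 h2 _
    exact absurd (List.length_eq_zero_iff.mp (Nat.le_zero.mp h1)) h2
  | succ n ih =>
    intro l pre hlen hne hfull
    obtain ⟨x, t, rfl⟩ : ∃ x t, l = x :: t := by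
      cases l with
      | nil => exact absurd rfl hne
      | cons a b => exact ⟨a, b, rfl⟩
    rw [cutFilt full pre (x :: t) x t rfl hfull]
    set r := (runSplit t x).1 with hr
    set rest := (runSplit t x).2 with hrest
    set k := r.length + 1 with hk
    have hdec : t = r ++ rest := by rw [hr, hrest]; exact runSplit_decomp t x
    have hseg : segs (x :: t) = (x :: r) :: segs rest := by
      rw [segs]
    have hfull2 : full = (pre ++ (x :: r)) ++ rest := by
      rw [hfull, hdec]
      simp
    have hdrop : full.drop pre.length = (x :: r) ++ rest := by
      rw [hfull2, show (pre ++ (x :: r)) ++ rest = pre ++ ((x :: r) ++ rest) from by simp,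
        List.drop_left]
    have hslice : (full.drop pre.length).take k = x :: r := by
      rw [hdrop, show k = (x :: r).length from by simp [hk], List.take_left]
    by_cases hre : rest = []
    · rw [if_pos hre]
      have hNlen : full.length = pre.length + k := by
        rw [hfull2, hre]
        simp [hk]
      have hsub : full.length - pre.length = k := by omega
      have hcast : (full.length : Int) - (pre.length : Int) = (k : Int) := by
        rw [hNlen]; push_cast; ring
      rw [hseg, hre]
      rw [show segs [] = [] from by rw [segs]]
      simp only [List.nil_append]
      rw [pvPairsOut_cons]
      rw [show pvPairsOut full length [full.length] = [] from by simp [pvPairsOut],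
        hcast, hsub, hslice, List.append_nil]
      by_cases hbig : (k : Int) > length
      · have hb : pvBig length (x :: r) = true := by
          simp only [pvBig, decide_eq_true_eq]
          simpa [hk] using hbig
        rw [if_pos hbig]
        simp [hb]
      · have hb : pvBig length (x :: r) = false := by
          simp only [pvBig, decide_eq_false_iff_not]
          simpa [hk] using hbig
        rw [if_neg hbig]
        simp [hb]
    · rw [if_neg hre]
      rw [show (pre.length + k) :: (pvCutsN full).filter (fun c => decide (pre.length + k < c)) ++ [full.length]
          = (pre.length + k) :: ((pvCutsN full).filter (fun c => decide (pre.length + k < c)) ++ [full.length])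
          from by simp]
      rw [pvPairsOut_cons]
      have hlen2 : rest.length ≤ n := by
        have h1 : t.length = r.length + rest.length := by rw [hdec]; simp
        have h2 : (x :: t).length = t.length + 1 := by simp
        omega
      have ihr := ih rest (pre ++ (x :: r)) hlen2 hre hfull2
      have hplen : (pre ++ (x :: r)).length = pre.length + k := by simp [hk]
      rw [hplen] at ihr
      rw [ihr, hseg, List.filter_cons]
      have hcast : ((pre.length + k : Nat) : Int) - (pre.length : Int) = (k : Int) := by
        push_cast; ring
      have hsub : pre.length + k - pre.length = k := by omega
      rw [hcast, hsub, hslice]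
      by_cases hbig : (k : Int) > length
      · rw [if_pos hbig]
        have : pvBig length (x :: r) = true := by
          simp [pvBig]
          omega
        simp [this]
      · rw [if_neg hbig]
        have : pvBig length (x :: r) = false := by
          simp [pvBig]
          omega
        simp [this]

theorem grouper_alt_eq_segs (l : List Int) (length : Int) :
    grouper_alt l length = (if l = [] then [[]] else segs l).filter (pvBig length) := by
  rw [grouper_alt_eq_pairs]
  cases l with
  | nil =>
    by_cases h : (0 : Int) > length <;>
      simp [pvPairsOut, pvCutsN, List.zip, pvBig, h]
  | cons x t =>
    have hfl : (pvCutsN (x :: t)).filter (fun c => decide (([] : List Int).length < c)) = pvCutsN (x :: t) := by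
      apply List.filter_eq_self.mpr
      intro c hc
      simp only [pvCutsN, List.mem_map] at hc
      obtain ⟨j, _, rfl⟩ := hc
      simp
    have := mainB (x :: t) length (x :: t).length (x :: t) [] le_rfl (by simp) (by simp)
    rw [hfl] at this
    rw [if_neg (by simp)]
    simpa using this

-- ===== VERDICT (by name: the statement is the Claim_ definition above) =====
theorem grouper_spec : Claim_equal_grouper := by
  intro iterable length _
  unfold Spec_grouper
  rw [grouper_eq_segs, grouper_alt_eq_segs]
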